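-- pv_equiv track=rewrite | github.com/AlexCovizzi/critical-node-problem | graph.py | calc_alt_objective
-- ===== SOURCE A (Python) =====
-- def visit_connected(graph, i, visited, removed=None):
--     if removed is None or i not in removed:
--         visited[i] = 1
--         row = graph[i]
--         for j in range(len(row)):
--             if row[j] == 1 and visited[j] == 0:
--                 visit_connected(graph, j, visited, removed)
--
-- def calc_alt_objective(graph, removed):
--     sol = 0
--
--     for i in range(len(graph)):
--         visited = [0 for cont in range(len(graph))]
--         if i not in removed:
--             visit_connected(graph, i, visited, removed)
--         else:
--             visited[i] = 1
--         sol += sum(visited)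
--
--     return sol
-- ===== SOURCE B (Python) =====
-- def calc_alt_objective(graph, removed):
--     n = len(graph)
--     rem = set(removed)
--     total = 0
--     for i in range(n):
--         if i in rem:
--             total += 1
--         else:
--             seen = {i}
--             frontier = [i]
--             for _ in range(n):
--                 new_frontier = []
--                 for u in frontier:
--                     row = graph[u]
--                     for j in range(len(row)):
--                         if row[j] == 1 and j not in rem and j not in seen:
--                             seen.add(j)
--                             new_frontier.append(j)
--                 frontier = new_frontier
--             total += len(seen)
--     return total
-- ===== Notes on version B (the rewrite author's own statement) =====
-- stated objective: faster
-- what changed: A restarts a recursive DFS from every node with a fresh visited array and O(|removed|) list-membership tests inside the recursion; B precomputes the removed set once and runs an iterative frontier-based BFS per start node, summing the sizes of the seen sets.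
-- outside the precondition, e.g. on calc_alt_objective([[0], [0, 0, 1]], [1]): A returns 2, B returns 2
import Mathlib
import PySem

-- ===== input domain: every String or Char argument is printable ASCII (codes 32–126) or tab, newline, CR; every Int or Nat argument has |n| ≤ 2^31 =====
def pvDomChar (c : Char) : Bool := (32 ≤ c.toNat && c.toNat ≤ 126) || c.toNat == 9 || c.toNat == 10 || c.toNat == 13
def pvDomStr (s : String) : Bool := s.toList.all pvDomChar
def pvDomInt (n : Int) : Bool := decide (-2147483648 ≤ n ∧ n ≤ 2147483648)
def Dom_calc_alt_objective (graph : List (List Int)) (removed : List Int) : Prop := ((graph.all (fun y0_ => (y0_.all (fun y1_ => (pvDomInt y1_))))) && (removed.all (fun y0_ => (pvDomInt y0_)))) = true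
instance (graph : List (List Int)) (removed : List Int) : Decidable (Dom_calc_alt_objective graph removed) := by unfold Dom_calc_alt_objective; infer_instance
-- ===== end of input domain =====

-- B replaces A's per-start recursive DFS (fresh visited array per start, list-membership
-- tests on `removed`) by a per-start iterative frontier BFS over a prebuilt removed set.

-- ===== PORT A =====
-- Literal port of visit_connected; `fuel` only makes the recursion structural (the Python
-- recursion always terminates: each effective call flips a fresh 0 of `visited` to 1, so the
-- call depth is at most len(graph)+1 < fuel).  `visited[j]` is read with getD: under Pre_
-- every index Python actually reads is in range, exactly as in the Python.
def visitC (g : List (List Int)) (removed : List Int) : Nat → Nat → List Int → List Int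
  | 0, _, v => v
  | fuel+1, i, v =>
    if (i : Int) ∉ removed then
      (List.range (g.getD i []).length).foldl
        (fun vc j =>
          if (g.getD i []).getD j 0 = 1 ∧ vc.getD j 0 = 0
          then visitC g removed fuel j vc else vc)
        (v.set i 1)
    else v

def calc_alt_objective (graph : List (List Int)) (removed : List Int) : Int :=
  (List.range graph.length).foldl
    (fun (sol : Int) (i : ℕ) =>
      let visited := List.replicate graph.length (0 : Int)
      let visited :=
        if (i : Int) ∉ removed then visitC graph removed (graph.length + 2) i visited
        else visited.set i 1
      sol + visited.sum)
    0

-- ===== PORT B =====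
-- innermost loop body of Source B: try one candidate column j of the row being scanned
def bfsStep (row : List Int) (rem : PySem.Set Int) (st3 : PySem.Set Int × List Nat) (j : Nat) : PySem.Set Int × List Nat :=
  if row.getD j 0 = 1 ∧ ¬ PySem.Set.contains rem (j : Int) ∧ ¬ PySem.Set.contains st3.1 (j : Int)
  then (PySem.Set.add st3.1 (j : Int), st3.2 ++ [j]) else st3

-- process one frontier node u: scan its row, adding fresh non-removed successors
def bfsInner (g : List (List Int)) (rem : PySem.Set Int) (st2 : PySem.Set Int × List Nat) (u : Nat) : PySem.Set Int × List Nat :=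
  (List.range (g.getD u []).length).foldl (bfsStep (g.getD u []) rem) st2

-- one BFS round of Source B: sweep the frontier, returning (seen, new_frontier)
def bfsRound (g : List (List Int)) (rem : PySem.Set Int) (st : PySem.Set Int × List Nat) : PySem.Set Int × List Nat :=
  st.2.foldl (bfsInner g rem) (st.1, [])

def calc_alt_objective_alt (graph : List (List Int)) (removed : List Int) : Int :=
  let n := graph.length
  let rem : PySem.Set Int := PySem.Set.ofList removed
  (List.range n).foldl
    (fun (total : Int) (i : ℕ) =>
      if PySem.Set.contains rem (i : Int) then total + 1
      else
        let st := (List.range n).foldl (fun st _ => bfsRound graph rem st)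
                    (PySem.Set.add PySem.Set.empty (i : Int), [i])
        total + PySem.Set.len st.1)
    0

-- ===== PRECONDITION & SPEC =====
-- Pre_ excludes graphs in which some row carries the value 1 at a column index ≥ len(graph):
-- when such a row is reached, A raises IndexError on visited[j]; when that row's node is never
-- visited A still returns, and B returns the same value there (see claim cites).
def Pre_calc_alt_objective (graph : List (List Int)) (removed : List Int) : Prop :=
  ∀ row ∈ graph, ∀ x ∈ row.drop graph.length, x ≠ 1

instance (graph : List (List Int)) (removed : List Int) : Decidable (Pre_calc_alt_objective graph removed) := by
  unfold Pre_calc_alt_objective; infer_instance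

def pvWitness_calc_alt_objective : List (List Int) × List Int := ([[0, 1, 0], [1, 0, 1], [0, 1, 0]], [1])

def Spec_calc_alt_objective (graph : List (List Int)) (removed : List Int) (out : Int) : Prop := out = calc_alt_objective_alt graph removed
instance (graph : List (List Int)) (removed : List Int) (out : Int) : Decidable (Spec_calc_alt_objective graph removed out) := by unfold Spec_calc_alt_objective; infer_instance

-- ===== CLAIM (what is proved, stated in full; the proofs are below) =====
def Claim_equal_calc_alt_objective : Prop := ∀ (graph : List (List Int)) (removed : List Int), Dom_calc_alt_objective graph removed → Pre_calc_alt_objective graph removed → Spec_calc_alt_objective graph removed (calc_alt_objective graph removed)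

-- ===== LEMMAS AND PROOFS =====

-- the restricted edge relation both programs explore: a 1-entry between non-removed nodes
def pvEdg (g : List (List Int)) (u j : ℕ) : Prop := (g.getD u []).getD j 0 = 1

def pvRel (g : List (List Int)) (removed : List Int) (u j : ℕ) : Prop :=
  (u : Int) ∉ removed ∧ pvEdg g u j ∧ (j : Int) ∉ removed

def pvReach (g : List (List Int)) (removed : List Int) (i j : ℕ) : Prop :=
  Relation.ReflTransGen (pvRel g removed) i j

-- "every 1-mark of v is a 1-mark of w"
def SubV (v w : List Int) : Prop := ∀ k, v.getD k 0 = 1 → w.getD k 0 = 1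

-- marked positions of a visited array, as a Finset
def onesF (n : ℕ) (v : List Int) : Finset ℕ := (Finset.range n).filter (fun k => v.getD k 0 = 1)

-- ---- generic list lemmas ----

theorem nodup_concat' (l : List Int) (x : Int) (h : l.Nodup) (hx : x ∉ l) : (l ++ [x]).Nodup := by
  simpa [List.concat_eq_append] using List.Nodup.concat hx h

theorem sum_getD (v : List Int) : v.sum = ∑ k ∈ Finset.range v.length, v.getD k 0 := by
  induction v with
  | nil => simp
  | cons x t ih => simp [Finset.sum_range_succ', ih]; ring

theorem getD_set (v : List Int) (i k : ℕ) (a : Int) :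
    (v.set i a).getD k 0 = if k = i ∧ i < v.length then a else v.getD k 0 := by
  rcases Nat.lt_or_ge k v.length with h | h
  · by_cases hk : k = i
    · subst hk; simp [List.getD, List.getElem?_set, h]
    · simp only [List.getD, List.getElem?_set, hk]
      rw [if_neg (by omega), if_neg (by simp)]
  · rw [List.getD_eq_default _ _ (by simpa using h), List.getD_eq_default _ _ h]
    rw [if_neg (by omega)]

theorem getD_replicate0 (n k : ℕ) : (List.replicate n (0 : Int)).getD k 0 = 0 := by
  simp only [List.getD, List.getElem?_replicate]
  split <;> rfl

theorem getD_mem_or_default (v : List Int) (u : ℕ) : v.getD u 0 = 0 ∨ v.getD u 0 ∈ v := by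
  rcases Nat.lt_or_ge u v.length with h | h
  · right; rw [List.getD_eq_getElem _ _ h]; exact List.getElem_mem h
  · left; exact List.getD_eq_default _ _ h

theorem getD01_of_ne_one {v : List Int} (h01 : ∀ x ∈ v, x = 0 ∨ x = 1) {u : ℕ}
    (h : v.getD u 0 ≠ 1) : v.getD u 0 = 0 := by
  rcases getD_mem_or_default v u with h0 | hm
  · exact h0
  · rcases h01 _ hm with h0 | h1
    · exact h0
    · exact absurd h1 h

theorem foldl_const_iterate {α : Type} (F : α → α) (l : List ℕ) (st : α) :
    l.foldl (fun s _ => F s) st = F^[l.length] st := by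
  induction l generalizing st with
  | nil => rfl
  | cons x t ih => simp [List.foldl_cons, ih, Function.iterate_succ_apply]

theorem subV_trans {a b c : List Int} (h1 : SubV a b) (h2 : SubV b c) : SubV a c :=
  fun k hk => h2 k (h1 k hk)

theorem subV_foldl {α : Type} (f : List Int → α → List Int)
    (h : ∀ b a, SubV b (f b a)) (l : List α) (b : List Int) : SubV b (l.foldl f b) := by
  induction l generalizing b with
  | nil => exact fun k hk => hk
  | cons x t ih => exact subV_trans (h b x) (ih (f b x))

theorem onesF_mono {n : ℕ} {a b : List Int} (h : SubV a b) : onesF n a ⊆ onesF n b := by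
  intro k hk
  simp only [onesF, Finset.mem_filter] at hk ⊢
  exact ⟨hk.1, h k hk.2⟩

theorem onesF_card_le (n : ℕ) (v : List Int) : (onesF n v).card ≤ n := by
  simpa using Finset.card_filter_le (Finset.range n) (fun k => v.getD k 0 = 1)

theorem onesF_card_lt {n : ℕ} {v : List Int} {i : ℕ} (hi : i < n) (hv : v.getD i 0 = 0) :
    (onesF n v).card ≤ n - 1 := by
  have hsub : onesF n v ⊆ (Finset.range n).erase i := by
    intro k hk
    simp only [onesF, Finset.mem_filter] at hk
    rw [Finset.mem_erase]
    refine ⟨?_, hk.1⟩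
    rintro rfl
    rw [hv] at hk; exact absurd hk.2 (by norm_num)
  calc (onesF n v).card ≤ ((Finset.range n).erase i).card := Finset.card_le_card hsub
    _ = n - 1 := by rw [Finset.card_erase_of_mem (Finset.mem_range.mpr hi)]; simp

theorem onesF_set_card {n : ℕ} {v : List Int} {i : ℕ} (hi : i < n) (hlen : v.length = n)
    (hv : v.getD i 0 = 0) : (onesF n (v.set i 1)).card = (onesF n v).card + 1 := by
  have hins : onesF n (v.set i 1) = insert i (onesF n v) := by
    ext k
    simp only [onesF, Finset.mem_filter, Finset.mem_insert, Finset.mem_range]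
    rw [getD_set]
    by_cases hk : k = i
    · subst hk
      rw [if_pos ⟨rfl, by omega⟩]
      simp [hi]
    · rw [if_neg (by simp [hk])]
      simp [hk]
  rw [hins, Finset.card_insert_of_notMem]
  intro hmem
  simp only [onesF, Finset.mem_filter] at hmem
  rw [hv] at hmem
  exact absurd hmem.2 (by norm_num)

-- ---- Pre_-based facts ----

theorem edge_lt {g : List (List Int)} {removed : List Int}
    (hPre : Pre_calc_alt_objective g removed) {u j : ℕ} (h : pvEdg g u j) : j < g.length := by
  unfold pvEdg at h
  by_contra hj
  push_neg at hj
  rcases Nat.lt_or_ge u g.length with hu | hu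
  · rcases Nat.lt_or_ge j (g.getD u []).length with hjl | hjl
    · have hrow : g.getD u [] ∈ g := by
        rw [List.getD_eq_getElem _ _ hu]; exact List.getElem_mem hu
      have hlt2 : j - g.length < ((g.getD u []).drop g.length).length := by
        rw [List.length_drop]; omega
      have hmem : (g.getD u []).getD j 0 ∈ (g.getD u []).drop g.length := by
        rw [List.getD_eq_getElem _ _ hjl]
        have : (g.getD u [])[j] = ((g.getD u []).drop g.length)[j - g.length] := by
          rw [List.getElem_drop]
          congr 1; omega
        rw [this]
        exact List.getElem_mem hlt2
      exact hPre _ hrow _ hmem h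
    · rw [List.getD_eq_default _ _ hjl] at h; exact absurd h (by norm_num)
  · rw [show g.getD u [] = [] from List.getD_eq_default _ _ hu] at h
    simp [List.getD] at h

theorem edge_lt_row {g : List (List Int)} {u j : ℕ} (h : pvEdg g u j) :
    j < (g.getD u []).length := by
  unfold pvEdg at h
  by_contra hj
  push_neg at hj
  rw [List.getD_eq_default _ _ hj] at h
  exact absurd h (by norm_num)

theorem reach_lt {g : List (List Int)} {removed : List Int}
    (hPre : Pre_calc_alt_objective g removed) {i k : ℕ} (hi : i < g.length)
    (h : pvReach g removed i k) : k < g.length := by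
  induction h with
  | refl => exact hi
  | tail _ hrel _ => exact edge_lt hPre hrel.2.1

theorem reach_not_rem {g : List (List Int)} {removed : List Int} {i k : ℕ}
    (hi : (i : Int) ∉ removed) (h : pvReach g removed i k) : (k : Int) ∉ removed := by
  induction h with
  | refl => exact hi
  | tail _ hrel _ => exact hrel.2.2

-- ---- port A: properties of visitC ----

theorem visitC_removed {g : List (List Int)} {removed : List Int} {fuel i : ℕ} {v : List Int}
    (h : (i : Int) ∈ removed) : visitC g removed fuel i v = v := by
  cases fuel with
  | zero => rfl
  | succ f => simp [visitC, h]

theorem visitC_len (g : List (List Int)) (removed : List Int) (fuel : ℕ) :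
    ∀ (i : ℕ) (v : List Int), (visitC g removed fuel i v).length = v.length := by
  induction fuel with
  | zero => intro i v; rfl
  | succ f ih =>
    intro i v
    simp only [visitC]
    split
    · refine List.foldlRecOn _ _ (motive := fun (w : List Int) => w.length = v.length) (by simp) ?_
      intro b hb a _
      dsimp only
      split
      · rw [ih]; exact hb
      · exact hb
    · rfl

theorem visitC_sub (g : List (List Int)) (removed : List Int) (fuel : ℕ) :
    ∀ (i : ℕ) (v : List Int), SubV v (visitC g removed fuel i v) := by
  induction fuel with
  | zero => intro i v k hk; exact hk
  | succ f ih =>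
    intro i v
    simp only [visitC]
    split
    · refine List.foldlRecOn _ _ (motive := fun (w : List Int) => SubV v w) ?_ ?_
      · intro k hk
        rw [getD_set]
        split
        · rfl
        · exact hk
      · intro b hb a _
        dsimp only
        split
        · exact subV_trans hb (ih a b)
        · exact hb
    · intro k hk; exact hk

theorem visitC_01 (g : List (List Int)) (removed : List Int) (fuel : ℕ) :
    ∀ (i : ℕ) (v : List Int), (∀ x ∈ v, x = 0 ∨ x = 1) →
      ∀ x ∈ visitC g removed fuel i v, x = 0 ∨ x = 1 := by
  induction fuel with
  | zero => intro i v h; exact h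
  | succ f ih =>
    intro i v h01
    simp only [visitC]
    split
    · refine List.foldlRecOn _ _ (motive := fun (w : List Int) => ∀ x ∈ w, x = 0 ∨ x = 1) ?_ ?_
      · intro x hx
        rcases List.mem_or_eq_of_mem_set hx with hx' | rfl
        · exact h01 x hx'
        · right; rfl
      · intro b hb a _
        dsimp only
        split
        · exact ih a b hb
        · exact hb
    · exact h01

theorem visitC_self {g : List (List Int)} {removed : List Int} {fuel i : ℕ} {v : List Int}
    (hi : (i : Int) ∉ removed) (hlt : i < v.length) :
    (visitC g removed (fuel + 1) i v).getD i 0 = 1 := by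
  simp only [visitC, if_pos hi]
  refine subV_foldl _ ?_ _ _ i ?_
  · intro b a
    dsimp only
    split
    · exact visitC_sub g removed fuel a b
    · intro k hk; exact hk
  · rw [getD_set, if_pos ⟨rfl, hlt⟩]

theorem visitC_sound (g : List (List Int)) (removed : List Int) (fuel : ℕ) :
    ∀ (i : ℕ) (v : List Int) (k : ℕ), (visitC g removed fuel i v).getD k 0 = 1 →
      v.getD k 0 = 1 ∨ ((i : Int) ∉ removed ∧ pvReach g removed i k) := by
  induction fuel with
  | zero => intro i v k h; exact Or.inl h
  | succ f ih =>
    intro i v k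
    simp only [visitC]
    split
    · rename_i hir
      intro h
      have H : ∀ k, ((List.range (g.getD i []).length).foldl
          (fun vc j => if (g.getD i []).getD j 0 = 1 ∧ vc.getD j 0 = 0
            then visitC g removed f j vc else vc) (v.set i 1)).getD k 0 = 1 →
          v.getD k 0 = 1 ∨ pvReach g removed i k := by
        refine List.foldlRecOn _ _
          (motive := fun (w : List Int) => ∀ k, w.getD k 0 = 1 → v.getD k 0 = 1 ∨ pvReach g removed i k) ?_ ?_
        · intro k hk
          rw [getD_set] at hk
          split_ifs at hk with hc
          · right; rw [hc.1]; exact Relation.ReflTransGen.refl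
          · left; exact hk
        · intro b hb a _ k hk
          split_ifs at hk with hg
          · rcases ih a b k hk with h1 | ⟨har, hr⟩
            · exact hb k h1
            · exact Or.inr (Relation.ReflTransGen.head ⟨hir, hg.1, har⟩ hr)
          · exact hb k hk
      rcases H k h with h1 | h2
      · exact Or.inl h1
      · exact Or.inr ⟨hir, h2⟩
    · intro h; exact Or.inl h

theorem visitC_closed {g : List (List Int)} {removed : List Int}
    (hPre : Pre_calc_alt_objective g removed) : ∀ (fuel : ℕ),
    ∀ (i : ℕ) (v : List Int),
      v.length = g.length → (i : Int) ∉ removed → i < g.length → v.getD i 0 = 0 →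
      (∀ x ∈ v, x = 0 ∨ x = 1) →
      g.length + 1 ≤ fuel + (onesF g.length v).card →
      ∀ u k, (visitC g removed fuel i v).getD u 0 = 1 → v.getD u 0 = 0 →
        pvEdg g u k → (k : Int) ∉ removed → (visitC g removed fuel i v).getD k 0 = 1 := by
  intro fuel
  induction fuel with
  | zero =>
    intro i v _ _ hi hv _ hfuel
    have := onesF_card_lt hi hv
    omega
  | succ f IH =>
    intro i v hlen hir hi hvi h01 hfuel u k hu hv0 hedge hkr
    have hf1 : 1 ≤ f := by
      have := onesF_card_lt hi hvi
      omega
    have hv1card : (onesF g.length (v.set i 1)).card = (onesF g.length v).card + 1 :=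
      onesF_set_card hi hlen hvi
    simp only [visitC, if_pos hir] at hu ⊢
    -- the fold's step function
    set F : List Int → ℕ → List Int := fun vc j =>
      if (g.getD i []).getD j 0 = 1 ∧ vc.getD j 0 = 0 then visitC g removed f j vc else vc with hF
    have hFsub : ∀ b a, SubV b (F b a) := by
      intro b a
      rw [hF]; dsimp only
      split
      · exact visitC_sub g removed f a b
      · intro k hk; exact hk
    -- (e): every directly-explored successor of i ends up marked
    have hsucc : ∀ (l : List ℕ) (vc : List Int), vc.length = g.length →
        (∀ x ∈ vc, x = 0 ∨ x = 1) →
        ∀ j ∈ l, (g.getD i []).getD j 0 = 1 → (j : Int) ∉ removed →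
          (l.foldl F vc).getD j 0 = 1 := by
      intro l
      induction l with
      | nil => intro vc _ _ j hj; exact absurd hj (List.not_mem_nil)
      | cons a t iht =>
        intro vc hlen' h01' j hj hrow hjr
        rw [List.foldl_cons]
        have hlen'' : (F vc a).length = g.length := by
          rw [hF]; dsimp only; split
          · rw [visitC_len]; exact hlen'
          · exact hlen'
        have h01'' : ∀ x ∈ F vc a, x = 0 ∨ x = 1 := by
          rw [hF]; dsimp only; split
          · exact visitC_01 g removed f a vc h01'
          · exact h01'
        rcases List.mem_cons.mp hj with rfl | hjt
        · have hjlt : j < vc.length := by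
            rw [hlen']; exact edge_lt hPre hrow
          have hvj : (F vc j).getD j 0 = 1 := by
            by_cases h0 : vc.getD j 0 = 0
            · rw [hF]; dsimp only
              rw [if_pos ⟨hrow, h0⟩]
              obtain ⟨f', rfl⟩ : ∃ f', f = f' + 1 := ⟨f - 1, by omega⟩
              exact visitC_self hjr hjlt
            · have h1 : vc.getD j 0 = 1 := by
                rcases getD_mem_or_default vc j with hd | hm
                · exact absurd hd h0
                · rcases h01' _ hm with hd | h1
                  · exact absurd hd h0
                  · exact h1
              exact hFsub vc j j h1
          exact subV_foldl F hFsub t (F vc j) j hvj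
        · exact iht (F vc a) hlen'' h01'' j hjt hrow hjr
    -- (b): closedness relative to v.set i 1 along the fold
    have hclosed : ∀ (l : List ℕ) (vc : List Int), vc.length = g.length →
        (∀ x ∈ vc, x = 0 ∨ x = 1) → SubV (v.set i 1) vc →
        (∀ u k, vc.getD u 0 = 1 → (v.set i 1).getD u 0 = 0 →
          pvEdg g u k → (k : Int) ∉ removed → vc.getD k 0 = 1) →
        (∀ u k, (l.foldl F vc).getD u 0 = 1 → (v.set i 1).getD u 0 = 0 →
          pvEdg g u k → (k : Int) ∉ removed → (l.foldl F vc).getD k 0 = 1) := by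
      intro l
      induction l with
      | nil => intro vc _ _ _ hCl; exact hCl
      | cons a t iht =>
        intro vc hlen' h01' hsub' hCl
        rw [List.foldl_cons]
        have hlen'' : (F vc a).length = g.length := by
          rw [hF]; dsimp only; split
          · rw [visitC_len]; exact hlen'
          · exact hlen'
        have h01'' : ∀ x ∈ F vc a, x = 0 ∨ x = 1 := by
          rw [hF]; dsimp only; split
          · exact visitC_01 g removed f a vc h01'
          · exact h01'
        have hsub'' : SubV (v.set i 1) (F vc a) := subV_trans hsub' (hFsub vc a)
        refine iht (F vc a) hlen'' h01'' hsub'' ?_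
        -- closedness survives one step
        rw [hF]; dsimp only
        split_ifs with hg
        · intro u' k' hu' hv1u' hedge' hkr'
          by_cases hvcu : vc.getD u' 0 = 1
          · exact visitC_sub g removed f a vc k' (hCl u' k' hvcu hv1u' hedge' hkr')
          · by_cases har : (a : Int) ∈ removed
            · rw [visitC_removed har] at hu' ⊢
              exact absurd hu' hvcu
            · have hvcu0 : vc.getD u' 0 = 0 := getD01_of_ne_one h01' hvcu
              have hcard' : g.length + 1 ≤ f + (onesF g.length vc).card := by
                have h1 : (onesF g.length (v.set i 1)).card ≤ (onesF g.length vc).card :=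
                  Finset.card_le_card (onesF_mono hsub')
                omega
              exact IH a vc hlen' har (edge_lt hPre hg.1) hg.2 h01' hcard' u' k' hu' hvcu0 hedge' hkr'
        · exact hCl
    -- assemble
    by_cases hui : u = i
    · subst hui
      have hkrow : k < (g.getD u []).length := edge_lt_row hedge
      exact hsucc (List.range (g.getD u []).length) (v.set u 1)
        (by rw [List.length_set]; exact hlen)
        (by intro x hx
            rcases List.mem_or_eq_of_mem_set hx with hx' | rfl
            · exact h01 x hx'
            · right; rfl)
        k (List.mem_range.mpr hkrow) hedge hkr
    · have hv1u : (v.set i 1).getD u 0 = 0 := by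
        rw [getD_set, if_neg (by simp [hui])]; exact hv0
      refine hclosed (List.range (g.getD i []).length) (v.set i 1)
        (by rw [List.length_set]; exact hlen)
        (by intro x hx
            rcases List.mem_or_eq_of_mem_set hx with hx' | rfl
            · exact h01 x hx'
            · right; rfl)
        (fun k hk => hk)
        ?_ u k hu hv1u hedge hkr
      intro u' k' hu' hv1u' _ _
      rw [hu'] at hv1u'; exact absurd hv1u' (by norm_num)

-- A's visited array from a fresh start marks exactly the nodes reachable from i
theorem visitC_char {g : List (List Int)} {removed : List Int}
    (hPre : Pre_calc_alt_objective g removed) {i : ℕ} (hi : i < g.length)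
    (hir : (i : Int) ∉ removed) (k : ℕ) :
    (visitC g removed (g.length + 2) i (List.replicate g.length 0)).getD k 0 = 1 ↔
      pvReach g removed i k := by
  constructor
  · intro h
    rcases visitC_sound g removed (g.length + 2) i _ k h with h1 | ⟨_, h2⟩
    · rw [getD_replicate0] at h1; exact absurd h1 (by norm_num)
    · exact h2
  · intro h
    induction h with
    | refl =>
      have : g.length + 2 = (g.length + 1) + 1 := rfl
      rw [this]
      exact visitC_self hir (by rw [List.length_replicate]; exact hi)
    | tail hab hrel ihk =>
      exact visitC_closed hPre (g.length + 2) i _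
        (by rw [List.length_replicate]) hir hi (getD_replicate0 _ _)
        (by intro x hx; left; exact (List.eq_of_mem_replicate hx))
        (by have := onesF_card_le g.length (List.replicate g.length (0:Int)); omega)
        _ _ ihk (getD_replicate0 _ _) hrel.2.1 hrel.2.2

-- ---- port B: properties of the BFS folds ----

theorem contains_ofList_iff (removed : List Int) (x : Int) :
    PySem.Set.contains (PySem.Set.ofList removed) x = true ↔ x ∈ removed := by
  rw [PySem.Set.contains_iff, PySem.Set.mem_ofList]

-- shape: the seen set only ever grows by appending exactly the new frontier, keeping Nodup
def ShapeP (S0 : List Int) (st : PySem.Set Int × List Nat) : Prop :=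
  st.1 = S0 ++ st.2.map (fun (u : ℕ) => (u : Int)) ∧ st.1.Nodup

theorem step_shape {row : List Int} {rem : PySem.Set Int} {S0 : List Int}
    {st : PySem.Set Int × List Nat} (h : ShapeP S0 st) (j : ℕ) :
    ShapeP S0 (bfsStep row rem st j) := by
  unfold bfsStep
  split_ifs with hg
  · have hnm : ((j : ℕ) : Int) ∉ st.1 := by
      intro hmem
      exact hg.2.2 ((PySem.Set.contains_iff st.1 _).mpr hmem)
    constructor
    · dsimp only
      rw [PySem.Set.add_of_not_mem hnm, h.1]
      simp
    · dsimp only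
      rw [PySem.Set.add_of_not_mem hnm]
      exact nodup_concat' _ _ h.2 hnm
  · exact h

theorem step_mem_mono {row : List Int} {rem : PySem.Set Int}
    {st : PySem.Set Int × List Nat} {x : Int} (h : x ∈ st.1) (j : ℕ) :
    x ∈ (bfsStep row rem st j).1 := by
  unfold bfsStep
  split_ifs
  · exact (PySem.Set.mem_add _ _ _).mpr (Or.inl h)
  · exact h

theorem inner_shape {g : List (List Int)} {rem : PySem.Set Int} {S0 : List Int}
    {st : PySem.Set Int × List Nat} (h : ShapeP S0 st) (u : ℕ) :
    ShapeP S0 (bfsInner g rem st u) := by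
  unfold bfsInner
  exact List.foldlRecOn _ _ (motive := fun (w : PySem.Set Int × List Nat) => ShapeP S0 w) h (fun b hb a _ => step_shape hb a)

theorem inner_mem_mono {g : List (List Int)} {rem : PySem.Set Int}
    {st : PySem.Set Int × List Nat} {x : Int} (h : x ∈ st.1) (u : ℕ) :
    x ∈ (bfsInner g rem st u).1 := by
  unfold bfsInner
  exact List.foldlRecOn _ _ (motive := fun (w : PySem.Set Int × List Nat) => x ∈ w.1) h (fun b hb a _ => step_mem_mono hb a)

theorem round_shape {g : List (List Int)} {rem : PySem.Set Int}
    {st : PySem.Set Int × List Nat} (h : st.1.Nodup) :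
    ShapeP st.1 (bfsRound g rem st) := by
  unfold bfsRound
  exact List.foldlRecOn _ _ (motive := fun (w : PySem.Set Int × List Nat) => ShapeP st.1 w)
    (by constructor <;> simp [h]) (fun b hb a _ => inner_shape hb a)

theorem inner_succ {g : List (List Int)} {removed : List Int}
    {st2 : PySem.Set Int × List Nat} {u k : ℕ}
    (he : pvEdg g u k) (hk : (k : Int) ∉ removed) :
    (k : Int) ∈ (bfsInner g (PySem.Set.ofList removed) st2 u).1 := by
  have hkrow : k < (g.getD u []).length := edge_lt_row he
  obtain ⟨l1, l2, hsplit⟩ := List.mem_iff_append.mp (List.mem_range.mpr hkrow)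
  unfold bfsInner
  rw [hsplit, List.foldl_append, List.foldl_cons]
  have hstep : (k : Int) ∈ (bfsStep (g.getD u []) (PySem.Set.ofList removed)
      (List.foldl (bfsStep (g.getD u []) (PySem.Set.ofList removed)) st2 l1) k).1 := by
    set st1 := List.foldl (bfsStep (g.getD u []) (PySem.Set.ofList removed)) st2 l1
    unfold bfsStep
    by_cases hc : PySem.Set.contains st1.1 (k : Int) = true
    · rw [if_neg (by intro hg; exact hg.2.2 hc)]
      exact (PySem.Set.contains_iff _ _).mp hc
    · rw [if_pos ⟨he, by rwa [contains_ofList_iff] , by simpa using hc⟩]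
      exact (PySem.Set.mem_add _ _ _).mpr (Or.inr rfl)
  exact List.foldlRecOn _ _ (motive := fun (w : PySem.Set Int × List Nat) => (k : Int) ∈ w.1) hstep
    (fun b hb a _ => step_mem_mono hb a)

theorem round_succ {g : List (List Int)} {removed : List Int}
    {st : PySem.Set Int × List Nat} {u k : ℕ} (hu : u ∈ st.2)
    (he : pvEdg g u k) (hk : (k : Int) ∉ removed) :
    (k : Int) ∈ (bfsRound g (PySem.Set.ofList removed) st).1 := by
  obtain ⟨l1, l2, hsplit⟩ := List.mem_iff_append.mp hu
  unfold bfsRound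
  rw [hsplit, List.foldl_append, List.foldl_cons]
  exact List.foldlRecOn _ _ (motive := fun (w : PySem.Set Int × List Nat) => (k : Int) ∈ w.1)
    (inner_succ he hk) (fun b hb a _ => inner_mem_mono hb a)

-- invariant of the round iteration
def InvB (g : List (List Int)) (removed : List Int) (i : ℕ) (st : PySem.Set Int × List Nat) : Prop :=
  st.1.Nodup ∧
  (∀ u ∈ st.2, (u : Int) ∈ st.1) ∧
  (∀ x ∈ st.1, ∃ k : ℕ, x = (k : Int) ∧ pvReach g removed i k) ∧
  (∀ u : ℕ, (u : Int) ∈ st.1 → u ∉ st.2 →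
    ∀ k, pvEdg g u k → (k : Int) ∉ removed → (k : Int) ∈ st.1)

theorem inner_sound {g : List (List Int)} {removed : List Int} {i u : ℕ}
    (hir : (i : Int) ∉ removed) (hru : pvReach g removed i u)
    {st2 : PySem.Set Int × List Nat}
    (h : ∀ x ∈ st2.1, ∃ k : ℕ, x = (k : Int) ∧ pvReach g removed i k) :
    ∀ x ∈ (bfsInner g (PySem.Set.ofList removed) st2 u).1,
      ∃ k : ℕ, x = (k : Int) ∧ pvReach g removed i k := by
  unfold bfsInner
  refine List.foldlRecOn _ _
    (motive := fun (w : PySem.Set Int × List Nat) => ∀ x ∈ w.1, ∃ k : ℕ, x = (k : Int) ∧ pvReach g removed i k) h ?_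
  intro b hb j _ x hx
  unfold bfsStep at hx
  split_ifs at hx with hg
  · rcases (PySem.Set.mem_add _ _ _).mp hx with hx' | rfl
    · exact hb x hx'
    · refine ⟨j, rfl, Relation.ReflTransGen.tail hru ?_⟩
      refine ⟨reach_not_rem hir hru, hg.1, ?_⟩
      intro hmem
      exact hg.2.1 ((contains_ofList_iff removed _).mpr hmem)
  · exact hb x hx

theorem round_inv {g : List (List Int)} {removed : List Int} {i : ℕ}
    (hir : (i : Int) ∉ removed) {st : PySem.Set Int × List Nat}
    (h : InvB g removed i st) : InvB g removed i (bfsRound g (PySem.Set.ofList removed) st) := by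
  obtain ⟨hnd, hfr, hsound, hclosed⟩ := h
  have hshape := round_shape (g := g) (rem := PySem.Set.ofList removed) hnd
  refine ⟨hshape.2, ?_, ?_, ?_⟩
  · intro u hu
    rw [hshape.1]
    exact List.mem_append_right _ (List.mem_map.mpr ⟨u, hu, rfl⟩)
  · -- soundness
    unfold bfsRound
    refine List.foldlRecOn _ _
      (motive := fun (w : PySem.Set Int × List Nat) => ∀ x ∈ w.1, ∃ k : ℕ, x = (k : Int) ∧ pvReach g removed i k)
      hsound ?_
    intro b hb u hu
    have hru : pvReach g removed i u := by
      rcases hsound _ (hfr u hu) with ⟨k, hk, hr⟩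
      rwa [Nat.cast_inj.mp hk]
    exact inner_sound hir hru hb
  · intro u0 hu0 hnot k hedge hkr
    have hu0' : ((u0 : ℕ) : Int) ∈ st.1 := by
      rw [hshape.1] at hu0
      rcases List.mem_append.mp hu0 with h' | h'
      · exact h'
      · exfalso
        obtain ⟨u', hu', heq⟩ := List.mem_map.mp h'
        have : u' = u0 := Nat.cast_inj.mp heq
        exact hnot (this ▸ hu')
    by_cases hmem : u0 ∈ st.2
    · exact round_succ hmem hedge hkr
    · have := hclosed u0 hu0' hmem k hedge hkr
      rw [hshape.1]
      exact List.mem_append_left _ this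

theorem round_len {g : List (List Int)} {rem : PySem.Set Int}
    {st : PySem.Set Int × List Nat} (h : st.1.Nodup) :
    (bfsRound g rem st).1.length = st.1.length + (bfsRound g rem st).2.length := by
  have hs := round_shape (g := g) (rem := rem) h
  rw [hs.1]; simp

theorem round_stable {g : List (List Int)} {rem : PySem.Set Int}
    {st : PySem.Set Int × List Nat} (h : st.2 = []) : bfsRound g rem st = st := by
  obtain ⟨S, F⟩ := st
  simp only at h; subst h; rfl

theorem st0_fst (i : ℕ) : (PySem.Set.add PySem.Set.empty ((i : ℕ) : Int)) = [((i : ℕ) : Int)] := rfl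

theorem inv_st0 {g : List (List Int)} {removed : List Int} {i : ℕ} :
    InvB g removed i (PySem.Set.add PySem.Set.empty ((i : ℕ) : Int), [i]) := by
  rw [InvB, st0_fst]
  refine ⟨List.nodup_singleton _, ?_, ?_, ?_⟩
  · intro u hu
    rcases List.mem_singleton.mp hu with rfl
    exact List.mem_singleton.mpr rfl
  · intro x hx
    rcases List.mem_singleton.mp hx with rfl
    exact ⟨i, rfl, Relation.ReflTransGen.refl⟩
  · intro u hu hnot
    exfalso
    rcases List.mem_singleton.mp hu with heq
    rw [Nat.cast_inj.mp heq] at hnot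
    exact hnot (List.mem_singleton.mpr rfl)

theorem iterate_inv {g : List (List Int)} {removed : List Int} {i : ℕ}
    (hir : (i : Int) ∉ removed) (t : ℕ) :
    InvB g removed i ((bfsRound g (PySem.Set.ofList removed))^[t]
      (PySem.Set.add PySem.Set.empty ((i : ℕ) : Int), [i])) := by
  induction t with
  | zero => exact inv_st0
  | succ m ih =>
    rw [Function.iterate_succ_apply']
    exact round_inv hir ih

theorem iterate_mem_i {g : List (List Int)} {removed : List Int} {i : ℕ}
    (hir : (i : Int) ∉ removed) (t : ℕ) :
    ((i : ℕ) : Int) ∈ ((bfsRound g (PySem.Set.ofList removed))^[t]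
      (PySem.Set.add PySem.Set.empty ((i : ℕ) : Int), [i])).1 := by
  induction t with
  | zero =>
    rw [Function.iterate_zero_apply, st0_fst]
    exact List.mem_singleton.mpr rfl
  | succ m ih =>
    rw [Function.iterate_succ_apply']
    have hnd := (iterate_inv (g := g) hir m).1
    have hs := round_shape (g := g) (rem := PySem.Set.ofList removed) hnd
    rw [hs.1]
    exact List.mem_append_left _ ih

theorem inv_len_le {g : List (List Int)} {removed : List Int} {i : ℕ}
    (hPre : Pre_calc_alt_objective g removed) (hi : i < g.length)
    {st : PySem.Set Int × List Nat} (h : InvB g removed i st) :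
    st.1.length ≤ g.length := by
  rw [← List.toFinset_card_of_nodup h.1]
  have hsub : st.1.toFinset ⊆ (Finset.range g.length).image (fun (k : ℕ) => (k : Int)) := by
    intro x hx
    rcases h.2.2.1 x (List.mem_toFinset.mp hx) with ⟨k, rfl, hr⟩
    exact Finset.mem_image.mpr ⟨k, Finset.mem_range.mpr (reach_lt hPre hi hr), rfl⟩
  calc st.1.toFinset.card ≤ ((Finset.range g.length).image (fun (k : ℕ) => (k : Int))).card :=
        Finset.card_le_card hsub
    _ = g.length := by rw [Finset.card_image_of_injective _ Nat.cast_injective]; simp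

-- B's seen set after n rounds contains exactly the casts of the nodes reachable from i
theorem bfs_char {g : List (List Int)} {removed : List Int}
    (hPre : Pre_calc_alt_objective g removed) {i : ℕ} (hi : i < g.length)
    (hir : (i : Int) ∉ removed) (k : ℕ) :
    (((k : ℕ) : Int) ∈ ((List.range g.length).foldl
        (fun st _ => bfsRound g (PySem.Set.ofList removed) st)
        (PySem.Set.add PySem.Set.empty ((i : ℕ) : Int), [i])).1) ↔ pvReach g removed i k := by
  rw [foldl_const_iterate, List.length_range]
  set F := bfsRound g (PySem.Set.ofList removed) with hFdef
  set st0 : PySem.Set Int × List Nat := (PySem.Set.add PySem.Set.empty ((i : ℕ) : Int), [i]) with hst0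
  -- some round ≤ n empties the frontier
  have hex : ∃ t, t ≤ g.length ∧ (F^[t] st0).2 = [] := by
    by_contra hno
    have hno' : ∀ t, t ≤ g.length → (F^[t] st0).2 ≠ [] := by
      intro t ht he
      exact hno ⟨t, ht, he⟩
    have hgrow : ∀ m, m ≤ g.length → m + 1 ≤ (F^[m] st0).1.length := by
      intro m
      induction m with
      | zero =>
        intro _
        rw [Function.iterate_zero_apply, hst0]
        rw [st0_fst]
        simp
      | succ m' ihm =>
        intro hm
        have h1 := ihm (by omega)
        have hnd := (iterate_inv (g := g) hir m').1
        rw [Function.iterate_succ_apply']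
        rw [round_len hnd]
        rw [← hFdef, ← hst0]
        have hne := hno' (m' + 1) hm
        rw [Function.iterate_succ_apply'] at hne
        have : 0 < (F (F^[m'] st0)).2.length := List.length_pos_iff.mpr hne
        omega
    have hle := inv_len_le hPre hi (iterate_inv (g := g) hir g.length)
    rw [← hFdef, ← hst0] at hle
    have := hgrow g.length le_rfl
    omega
  obtain ⟨t, htn, hte⟩ := hex
  have hstab : ∀ m, F^[m] (F^[t] st0) = F^[t] st0 := by
    intro m
    induction m with
    | zero => rfl
    | succ m' ihm =>
      rw [Function.iterate_succ_apply', ihm]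
      exact round_stable hte
  have hnt : F^[g.length] st0 = F^[t] st0 := by
    have : g.length = (g.length - t) + t := by omega
    rw [this, Function.iterate_add_apply]
    exact hstab _
  rw [hnt]
  have hinv := iterate_inv (g := g) (removed := removed) hir t
  constructor
  · intro h
    rcases hinv.2.2.1 _ h with ⟨k', hk', hr⟩
    rwa [Nat.cast_inj.mp hk']
  · intro h
    induction h with
    | refl => exact iterate_mem_i hir t
    | tail hab hrel ihk =>
      refine hinv.2.2.2 _ ihk ?_ _ hrel.2.1 hrel.2.2
      rw [hte]
      exact List.not_mem_nil

-- ---- counting ----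

theorem sum_eq_card (v : List Int) (h01 : ∀ x ∈ v, x = 0 ∨ x = 1) :
    v.sum = (((Finset.range v.length).filter (fun k => v.getD k 0 = 1)).card : Int) := by
  rw [sum_getD]
  have : ∀ k ∈ Finset.range v.length, v.getD k 0 = if v.getD k 0 = 1 then (1 : Int) else 0 := by
    intro k hk
    rcases getD_mem_or_default v k with h0 | hm
    · rw [h0]; norm_num
    · rcases h01 _ hm with h0 | h1
      · rw [h0]; norm_num
      · rw [h1]; norm_num
  rw [Finset.sum_congr rfl this, Finset.sum_boole]

theorem per_index_eq {graph : List (List Int)} {removed : List Int}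
    (hPre : Pre_calc_alt_objective graph removed) {i : ℕ} (hi : i < graph.length) (sol : Int) :
    (sol + (if (i : Int) ∉ removed
            then visitC graph removed (graph.length + 2) i (List.replicate graph.length 0)
            else (List.replicate graph.length (0 : Int)).set i 1).sum) =
    (if PySem.Set.contains (PySem.Set.ofList removed) (i : Int) then sol + 1
     else sol + PySem.Set.len ((List.range graph.length).foldl
        (fun st _ => bfsRound graph (PySem.Set.ofList removed) st)
        (PySem.Set.add PySem.Set.empty ((i : ℕ) : Int), [i])).1) := by
  by_cases hir : (i : Int) ∈ removed
  · rw [if_neg (by simpa using hir), if_pos (by rw [contains_ofList_iff]; exact hir)]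
    congr 1
    rw [sum_getD]
    rw [List.length_set, List.length_replicate]
    have : ∀ k ∈ Finset.range graph.length,
        ((List.replicate graph.length (0 : Int)).set i 1).getD k 0 =
          if k = i then (1 : Int) else 0 := by
      intro k hk
      rw [getD_set, getD_replicate0]
      by_cases hki : k = i
      · rw [if_pos ⟨hki, by rw [List.length_replicate]; exact hi⟩, if_pos hki]
      · rw [if_neg (by simp [hki]), if_neg hki]
    rw [Finset.sum_congr rfl this, Finset.sum_ite_eq' (Finset.range graph.length) i (fun _ => (1 : Int))]
    rw [if_pos (Finset.mem_range.mpr hi)]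
  · rw [if_pos hir, if_neg (by rw [contains_ofList_iff]; exact hir)]
    congr 1
    set R := visitC graph removed (graph.length + 2) i (List.replicate graph.length 0) with hR
    have hR01 : ∀ x ∈ R, x = 0 ∨ x = 1 := by
      rw [hR]
      exact visitC_01 graph removed _ i _ (fun x hx => Or.inl (List.eq_of_mem_replicate hx))
    have hRlen : R.length = graph.length := by
      rw [hR, visitC_len, List.length_replicate]
    rw [sum_eq_card R hR01, hRlen]
    set S := ((List.range graph.length).foldl
        (fun st _ => bfsRound graph (PySem.Set.ofList removed) st)
        (PySem.Set.add PySem.Set.empty ((i : ℕ) : Int), [i])).1 with hS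
    have hSinv : InvB graph removed i ((List.range graph.length).foldl
        (fun st _ => bfsRound graph (PySem.Set.ofList removed) st)
        (PySem.Set.add PySem.Set.empty ((i : ℕ) : Int), [i])) := by
      rw [foldl_const_iterate]
      exact iterate_inv hir _
    have hSnd : S.Nodup := hSinv.1
    have hTeq : S.toFinset =
        ((Finset.range graph.length).filter (fun k => R.getD k 0 = 1)).image (fun (k : ℕ) => (k : Int)) := by
      ext x
      constructor
      · intro hx
        rcases hSinv.2.2.1 x (List.mem_toFinset.mp hx) with ⟨k, rfl, hr⟩
        refine Finset.mem_image.mpr ⟨k, ?_, rfl⟩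
        rw [Finset.mem_filter, Finset.mem_range]
        exact ⟨reach_lt hPre hi hr, (visitC_char hPre hi hir k).mpr hr⟩
      · intro hx
        obtain ⟨k, hk, rfl⟩ := Finset.mem_image.mp hx
        rw [Finset.mem_filter] at hk
        have hr : pvReach graph removed i k := (visitC_char hPre hi hir k).mp hk.2
        rw [List.mem_toFinset, hS]
        exact (bfs_char hPre hi hir k).mpr hr
    have hlen : S.length =
        ((Finset.range graph.length).filter (fun k => R.getD k 0 = 1)).card := by
      rw [← List.toFinset_card_of_nodup hSnd, hTeq,
        Finset.card_image_of_injective _ Nat.cast_injective]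
    rw [PySem.Set.len, hlen]

-- ===== VERDICT (by name: the statement is the Claim_ definition above) =====
theorem calc_alt_objective_spec : Claim_equal_calc_alt_objective := by
  intro graph removed _hDom hPre
  unfold Spec_calc_alt_objective calc_alt_objective calc_alt_objective_alt
  apply PySem.List.foldl_congr_mem
  intro acc i hi
  have hi' : i < graph.length := List.mem_range.mp hi
  simpa using per_index_eq hPre hi' acc
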